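-- pv_equiv track=rewrite | github.com/Jiwon1729/Baekjoon | PythonSolution/1030.py | fractal
-- ===== SOURCE A (Python) =====
-- def fractal(s,N,K,i,j):
--     mid_st = (N**(s))*((N-K)//2)
--     mid_ed = (N**(s))*(((N-K)//2)+K)
--     if (i<mid_st or i>=mid_ed) or (j<mid_st or j>=mid_ed):
--         if s==0:
--             return 0
--         else:
--             return fractal(s-1,N,K,i%(N**(s)),j%(N**(s)))
--     else:
--         return 1
-- ===== SOURCE B (Python) =====
-- def fractal(s, N, K, i, j):
--     lo = (N - K) // 2
--     cur_i, cur_j = i, j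
--     for level in range(s, -1, -1):
--         p = N ** level
--         st = p * lo
--         ed = p * (lo + K)
--         if st <= cur_i < ed and st <= cur_j < ed:
--             return 1
--         cur_i %= p
--         cur_j %= p
--     return 0
-- ===== Notes on version B (the rewrite author's own statement) =====
-- stated objective: alternative
-- what changed: Replaces the tail recursion by an explicit loop over levels s..0 that keeps running coordinates and hoists the constant (N-K)//2 out of the iteration.
-- outside the precondition, e.g. on fractal(1, 0, 0, 5, 5): A raises ZeroDivisionError, B raises ZeroDivisionError; on fractal(-1, 2, 2, 0, 0): A returns 1, B returns 0; on fractal(-1, 3, 1, 0, 0): A raises ZeroDivisionError, B returns 0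
import Mathlib
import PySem

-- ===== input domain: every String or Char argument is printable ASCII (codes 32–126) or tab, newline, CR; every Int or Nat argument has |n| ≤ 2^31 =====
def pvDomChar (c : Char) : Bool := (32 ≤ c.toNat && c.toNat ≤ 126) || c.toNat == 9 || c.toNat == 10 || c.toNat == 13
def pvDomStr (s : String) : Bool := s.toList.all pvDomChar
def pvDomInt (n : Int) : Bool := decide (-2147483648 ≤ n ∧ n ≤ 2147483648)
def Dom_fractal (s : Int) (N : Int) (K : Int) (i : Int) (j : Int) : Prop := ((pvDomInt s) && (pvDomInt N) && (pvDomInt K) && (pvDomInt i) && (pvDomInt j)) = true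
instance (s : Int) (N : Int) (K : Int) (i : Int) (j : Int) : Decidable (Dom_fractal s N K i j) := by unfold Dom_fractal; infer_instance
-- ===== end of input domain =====

-- ===== PORT A =====
-- B is an explicit loop over levels with running coordinates instead of A's tail recursion; same cost.
-- A's recursion, expressed on the Nat value of s (the Pre_ admits only 0 ≤ s).
def fractalGo (n : Nat) (N : Int) (K : Int) (i : Int) (j : Int) : Int :=
  let p : Int := N ^ n
  let mid_st := p * (PySem.Int.floordiv (N - K) 2)
  let mid_ed := p * (PySem.Int.floordiv (N - K) 2 + K)
  if (i < mid_st ∨ i ≥ mid_ed) ∨ (j < mid_st ∨ j ≥ mid_ed) then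
    match n with
    | 0 => 0
    | Nat.succ m => fractalGo m N K (PySem.Int.mod i p) (PySem.Int.mod j p)
  else 1

def fractal (s : Int) (N : Int) (K : Int) (i : Int) (j : Int) : Int :=
  -- totalization guard: Pre_fractal requires 0 ≤ s (A's recursion does not terminate for s < 0)
  if s < 0 then 0 else fractalGo s.toNat N K i j

-- ===== PORT B =====
-- the loop body of Source B, over the remaining list of levels, carrying cur_i, cur_j
def fractalAltLoop (levels : List Int) (N : Int) (K : Int) (lo : Int) (curI : Int) (curJ : Int) : Int :=
  match levels with
  | [] => 0
  | level :: rest =>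
    let p : Int := N ^ level.toNat
    let st := p * lo
    let ed := p * (lo + K)
    if st ≤ curI ∧ curI < ed ∧ st ≤ curJ ∧ curJ < ed then 1
    else fractalAltLoop rest N K lo (PySem.Int.mod curI p) (PySem.Int.mod curJ p)

def fractal_alt (s : Int) (N : Int) (K : Int) (i : Int) (j : Int) : Int :=
  fractalAltLoop (PySem.List.pyRange s (-1) (-1)) N K (PySem.Int.floordiv (N - K) 2) i j

-- ===== PRECONDITION & SPEC =====
-- Pre_ excludes s < 0, where A's N**s is a float (A usually hits RecursionError), and N = 0 with
-- s > 0, where both programs raise ZeroDivisionError on i % (N**s).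
def Pre_fractal (s : Int) (N : Int) (K : Int) (i : Int) (j : Int) : Prop :=
  0 ≤ s ∧ (s = 0 ∨ N ≠ 0)
instance (s : Int) (N : Int) (K : Int) (i : Int) (j : Int) : Decidable (Pre_fractal s N K i j) := by
  unfold Pre_fractal; infer_instance
def pvWitness_fractal : Int × Int × Int × Int × Int := (2, 3, 1, 4, 4)

def Spec_fractal (s : Int) (N : Int) (K : Int) (i : Int) (j : Int) (out : Int) : Prop := out = fractal_alt s N K i j
instance (s : Int) (N : Int) (K : Int) (i : Int) (j : Int) (out : Int) : Decidable (Spec_fractal s N K i j out) := by unfold Spec_fractal; infer_instance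

-- ===== CLAIM =====
def Claim_equal_fractal : Prop := ∀ (s : Int) (N : Int) (K : Int) (i : Int) (j : Int), Dom_fractal s N K i j → Pre_fractal s N K i j → Spec_fractal s N K i j (fractal s N K i j)

-- ===== LEMMAS AND PROOFS =====
lemma fractalGo_eq_loop (n : Nat) (N K lo i j : Int) (hlo : lo = PySem.Int.floordiv (N - K) 2) :
    fractalGo n N K i j = fractalAltLoop (PySem.List.pyRange (n : Int) (-1) (-1)) N K lo i j := by
  subst hlo
  induction n generalizing i j with
  | zero =>
    rw [PySem.List.pyRange_neg_one_cons (by norm_num), PySem.List.pyRange_neg_one_eq_nil (by norm_num)]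
    simp only [fractalGo, fractalAltLoop, Int.toNat_natCast]
    split_ifs with h1 h2 <;> first | rfl | (exfalso; omega)
  | succ m ih =>
    have hcast : ((m + 1 : Nat) : Int) - 1 = (m : Int) := by push_cast; ring
    rw [PySem.List.pyRange_neg_one_cons (by push_cast; omega), hcast]
    simp only [fractalGo, fractalAltLoop, Int.toNat_natCast]
    split_ifs with h1 h2 <;> first | rfl | (exfalso; omega) | (exact ih _ _)

-- ===== VERDICT =====
theorem fractal_spec : Claim_equal_fractal := by
  intro s N K i j _ hpre
  unfold Spec_fractal fractal fractal_alt
  obtain ⟨hs, -⟩ := hpre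
  rw [if_neg (by omega)]
  have := fractalGo_eq_loop s.toNat N K (PySem.Int.floordiv (N - K) 2) i j rfl
  rwa [Int.toNat_of_nonneg hs] at this
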